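-- pv_equiv track=rewrite | github.com/diegogran94/Criptografia | Cifrado_flujo/nlfsr.py | nlfsr
-- ===== SOURCE A (Python) =====
-- def nlfsr(pol, semilla, lon_salida):
--
--     secuencia = semilla
--     L = len(semilla)
--     n_vars = len(pol[0])
--
--     for i in range(0,lon_salida-L):
--         a=0
--         for j in range(0,len(pol)):
--             b=0
--             for k in range(0,n_vars):
--                 b ^= pol[j][k] & secuencia[k+i]
--             a ^= b
--         secuencia.append(a)
--
--     return secuencia
-- ===== SOURCE B (Python) =====
-- def nlfsr(pol, semilla, lon_salida):
--     # Precompute a reduced feedback mask (AND distributes over XOR), then use a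
--     # single inner loop over the mask per output element, with no per-row scan.
--     steps = lon_salida - len(semilla)
--     if steps <= 0:
--         return semilla
--     n_vars = len(pol[0])
--     mask = [0] * n_vars
--     for row in pol:
--         for k in range(n_vars):
--             mask[k] ^= row[k]
--     sec = list(semilla)
--     for i in range(steps):
--         a = 0
--         for k in range(n_vars):
--             a ^= mask[k] & sec[k + i]
--         sec.append(a)
--     return sec
-- ===== Notes on version B (the rewrite author's own statement) =====
-- stated objective: alternative
-- what changed: B collapses the per-step XOR over all polynomial rows into a feedback mask precomputed once (XOR of the rows, valid since AND distributes over XOR), so each output element is produced by a single scan of n_vars cells rather than a row-by-row re-evaluation of the polynomial; equivalence is about the return value (A appends to semilla in place, B builds a fresh list).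
import Mathlib
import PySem

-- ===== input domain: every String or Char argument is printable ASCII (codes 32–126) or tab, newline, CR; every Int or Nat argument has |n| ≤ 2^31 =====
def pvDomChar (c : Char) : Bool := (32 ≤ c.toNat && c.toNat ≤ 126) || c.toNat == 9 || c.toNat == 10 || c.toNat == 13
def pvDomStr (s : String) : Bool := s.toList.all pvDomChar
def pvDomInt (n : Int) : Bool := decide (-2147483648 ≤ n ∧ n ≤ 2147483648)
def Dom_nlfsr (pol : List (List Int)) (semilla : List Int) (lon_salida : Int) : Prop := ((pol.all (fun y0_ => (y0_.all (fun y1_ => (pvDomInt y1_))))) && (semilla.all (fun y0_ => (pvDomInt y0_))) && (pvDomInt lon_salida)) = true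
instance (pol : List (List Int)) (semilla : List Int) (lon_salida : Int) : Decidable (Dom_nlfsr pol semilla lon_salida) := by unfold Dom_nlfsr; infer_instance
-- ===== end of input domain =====

-- B precomputes a reduced feedback mask (XOR of the polynomial rows) so each output bit needs one
-- scan of n_vars cells instead of a scan of every row; equivalence is about the RETURN value only
-- (Python A grows `semilla` in place and returns it, B builds a fresh list).

-- ===== PORT A =====
def nlfsr (pol : List (List Int)) (semilla : List Int) (lon_salida : Int) : List Int :=
  -- secuencia = semilla; L = len(semilla); n_vars = len(pol[0])  (pol = [] raises IndexError: outside Pre_)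
  let L : Int := semilla.length
  let n_vars : Int := ((pol.headD []).length : Int)
  (PySem.List.pyRange 0 (lon_salida - L) 1).foldl
    (fun secuencia i =>
      let a : Int :=
        (PySem.List.pyRange 0 ((pol.length : Int)) 1).foldl
          (fun a j =>
            let b : Int :=
              (PySem.List.pyRange 0 n_vars 1).foldl
                (fun b k =>
                  PySem.Int.bxor b (PySem.Int.band
                    (PySem.List.pyGetD (PySem.List.pyGetD pol j []) k 0)
                    (PySem.List.pyGetD secuencia (k + i) 0)))
                0
            PySem.Int.bxor a b)
          0
      secuencia ++ [a])
    semilla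

-- ===== PORT B =====
def nlfsr_alt (pol : List (List Int)) (semilla : List Int) (lon_salida : Int) : List Int :=
  let steps : Int := lon_salida - (semilla.length : Int)
  if steps ≤ 0 then semilla
  else
    let n_vars : Nat := (pol.headD []).length
    let mask : List Int :=
      pol.foldl (fun mask row =>
        (List.range n_vars).foldl
          (fun mask k => mask.set k (PySem.Int.bxor (mask.getD k 0) (row.getD k 0))) mask)
        (List.replicate n_vars 0)
    (List.range steps.toNat).foldl
      (fun sec i =>
        let a : Int := (List.range n_vars).foldl
          (fun a k => PySem.Int.bxor a (PySem.Int.band (mask.getD k 0) (sec.getD (k + i) 0))) 0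
        sec ++ [a])
      semilla

-- ===== PRECONDITION & SPEC =====
-- Pre_ excludes exactly the inputs on which Python A raises: pol = [] (IndexError on pol[0]),
-- and, when at least one new element is produced, a first row longer than the seed or a row
-- shorter than the first row (IndexError on secuencia[k+i] / pol[j][k]).
def Pre_nlfsr (pol : List (List Int)) (semilla : List Int) (lon_salida : Int) : Prop :=
  pol ≠ [] ∧ ((semilla.length : Int) < lon_salida →
    ((pol.headD []).length ≤ semilla.length ∧ ∀ row ∈ pol, (pol.headD []).length ≤ row.length))
instance (pol : List (List Int)) (semilla : List Int) (lon_salida : Int) : Decidable (Pre_nlfsr pol semilla lon_salida) := by unfold Pre_nlfsr; infer_instance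
def pvWitness_nlfsr : List (List Int) × List Int × Int := ([[1, 0, 1], [0, 1, 1]], [1, 0, 1], 7)

def Spec_nlfsr (pol : List (List Int)) (semilla : List Int) (lon_salida : Int) (out : List Int) : Prop := out = nlfsr_alt pol semilla lon_salida
instance (pol : List (List Int)) (semilla : List Int) (lon_salida : Int) (out : List Int) : Decidable (Spec_nlfsr pol semilla lon_salida out) := by unfold Spec_nlfsr; infer_instance

-- ===== CLAIM (what is proved, stated in full; the proofs are below) =====
def Claim_equal_nlfsr : Prop := ∀ (pol : List (List Int)) (semilla : List Int) (lon_salida : Int), Dom_nlfsr pol semilla lon_salida → Pre_nlfsr pol semilla lon_salida → Spec_nlfsr pol semilla lon_salida (nlfsr pol semilla lon_salida)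

-- ===== LEMMAS AND PROOFS =====

-- Two integers with the same two's-complement bits are equal.
lemma pvIntExt (a b : Int) (h : ∀ i, a.testBit i = b.testBit i) : a = b := by
  have hbig : ∀ m n : Nat, m.testBit (m + n + 1) = false := by
    intro m n
    exact Nat.testBit_eq_false_of_lt
      (lt_of_lt_of_le Nat.lt_two_pow_self (Nat.pow_le_pow_right (by norm_num) (by omega)))
  cases a with
  | ofNat m =>
    cases b with
    | ofNat n =>
      have : m = n := Nat.eq_of_testBit_eq fun i => by simpa [Int.testBit] using h i
      simp [this]
    | negSucc n =>
      exfalso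
      have h1 := h (m + n + 1)
      rw [show Int.testBit (Int.ofNat m) (m + n + 1) = m.testBit (m + n + 1) from rfl,
          show Int.testBit (Int.negSucc n) (m + n + 1) = !n.testBit (m + n + 1) from rfl] at h1
      rw [hbig m n, show n.testBit (m + n + 1) = false from
        Nat.testBit_eq_false_of_lt (lt_of_lt_of_le Nat.lt_two_pow_self
          (Nat.pow_le_pow_right (by norm_num) (by omega)))] at h1
      simp at h1
  | negSucc m =>
    cases b with
    | ofNat n =>
      exfalso
      have h1 := h (n + m + 1)
      rw [show Int.testBit (Int.negSucc m) (n + m + 1) = !m.testBit (n + m + 1) from rfl,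
          show Int.testBit (Int.ofNat n) (n + m + 1) = n.testBit (n + m + 1) from rfl] at h1
      rw [hbig n m, show m.testBit (n + m + 1) = false from
        Nat.testBit_eq_false_of_lt (lt_of_lt_of_le Nat.lt_two_pow_self
          (Nat.pow_le_pow_right (by norm_num) (by omega)))] at h1
      simp at h1
    | negSucc n =>
      have : m = n := Nat.eq_of_testBit_eq fun i => by
        have h1 := h i
        rw [show Int.testBit (Int.negSucc m) i = !m.testBit i from rfl,
            show Int.testBit (Int.negSucc n) i = !n.testBit i from rfl] at h1
        exact Bool.not_inj h1
      simp [this]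

lemma pvBxorEq (a b : Int) : PySem.Int.bxor a b = Int.xor a b := by
  cases a with
  | ofNat m =>
    cases b with
    | ofNat n =>
      simp only [PySem.Int.bxor]
      rw [if_pos (show (0:Int) ≤ Int.ofNat m by simp [Int.ofNat_eq_natCast]), if_pos (show (0:Int) ≤ Int.ofNat n by simp [Int.ofNat_eq_natCast])]
      rfl
    | negSucc n =>
      have e : (-(Int.negSucc n) - 1).toNat = n := by rw [Int.negSucc_eq]; omega
      simp only [PySem.Int.bxor]
      rw [if_pos (show (0:Int) ≤ Int.ofNat m by simp [Int.ofNat_eq_natCast]),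
          if_neg (fun h => (Int.negSucc_not_nonneg n).mp h), e,
          show (Int.ofNat m).toNat = m from rfl,
          show Int.xor (Int.ofNat m) (Int.negSucc n) = Int.negSucc (m ^^^ n) from rfl,
          Int.negSucc_eq]
      omega
  | negSucc m =>
    have e : (-(Int.negSucc m) - 1).toNat = m := by rw [Int.negSucc_eq]; omega
    cases b with
    | ofNat n =>
      simp only [PySem.Int.bxor]
      rw [if_neg (fun h => (Int.negSucc_not_nonneg m).mp h),
          if_pos (show (0:Int) ≤ Int.ofNat n by simp [Int.ofNat_eq_natCast]), e,
          show (Int.ofNat n).toNat = n from rfl,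
          show Int.xor (Int.negSucc m) (Int.ofNat n) = Int.negSucc (m ^^^ n) from rfl,
          Int.negSucc_eq]
      omega
    | negSucc n =>
      have e2 : (-(Int.negSucc n) - 1).toNat = n := by rw [Int.negSucc_eq]; omega
      simp only [PySem.Int.bxor]
      rw [if_neg (fun h => (Int.negSucc_not_nonneg m).mp h),
          if_neg (fun h => (Int.negSucc_not_nonneg n).mp h), e, e2]
      rfl

-- clearing the common bits is bitwise difference
lemma pvAndAddLdiff (m : Nat) : ∀ n : Nat, (m &&& n) + m.ldiff n = m := by
  induction m using Nat.strong_induction_on with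
  | _ m ih =>
    intro n
    by_cases hm : m = 0
    · subst hm
      have hl : Nat.ldiff 0 n = 0 :=
        Nat.eq_of_testBit_eq fun i => by simp [Nat.testBit_ldiff, Nat.zero_testBit]
      simp [Nat.zero_and, hl]
    · have hlt : m / 2 < m := Nat.div_lt_self (Nat.pos_of_ne_zero hm) one_lt_two
      have hIH := ih (m / 2) hlt (n / 2)
      have ha : (m &&& n) / 2 = m / 2 &&& n / 2 := Nat.and_div_two
      have hd : (m.ldiff n) / 2 = (m / 2).ldiff (n / 2) :=
        Nat.eq_of_testBit_eq fun i => by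
          simp [Nat.testBit_div_two, Nat.testBit_ldiff]
      have pa' : ((m &&& n) % 2 = 1) ↔ (m % 2 = 1 ∧ n % 2 = 1) := by
        have h := iff_of_eq (congrArg (· = true) (Nat.testBit_and m n 0))
        simp only [Nat.testBit_zero, Bool.and_eq_true, decide_eq_true_eq] at h
        exact h
      have pd' : ((m.ldiff n) % 2 = 1) ↔ (m % 2 = 1 ∧ ¬ n % 2 = 1) := by
        have h := iff_of_eq (congrArg (· = true) (Nat.testBit_ldiff m n 0))
        simpa [Nat.testBit_zero] using h
      omega

lemma pvSubAnd (m n : Nat) : m - (m &&& n) = m.ldiff n := by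
  have := pvAndAddLdiff m n; omega

lemma pvBandEq (a b : Int) : PySem.Int.band a b = Int.land a b := by
  cases a with
  | ofNat m =>
    cases b with
    | ofNat n =>
      simp only [PySem.Int.band]
      rw [if_pos (show (0:Int) ≤ Int.ofNat m by simp [Int.ofNat_eq_natCast]), if_pos (show (0:Int) ≤ Int.ofNat n by simp [Int.ofNat_eq_natCast])]
      rfl
    | negSucc n =>
      have e : (-(Int.negSucc n) - 1).toNat = n := by rw [Int.negSucc_eq]; omega
      simp only [PySem.Int.band]
      rw [if_pos (show (0:Int) ≤ Int.ofNat m by simp [Int.ofNat_eq_natCast]),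
          if_neg (fun h => (Int.negSucc_not_nonneg n).mp h), e,
          show (Int.ofNat m).toNat = m from rfl,
          show Int.land (Int.ofNat m) (Int.negSucc n) = Int.ofNat (m.ldiff n) from rfl]
      exact congrArg Int.ofNat (pvSubAnd m n)
  | negSucc m =>
    have e : (-(Int.negSucc m) - 1).toNat = m := by rw [Int.negSucc_eq]; omega
    cases b with
    | ofNat n =>
      simp only [PySem.Int.band]
      rw [if_neg (fun h => (Int.negSucc_not_nonneg m).mp h),
          if_pos (show (0:Int) ≤ Int.ofNat n by simp [Int.ofNat_eq_natCast]), e,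
          show (Int.ofNat n).toNat = n from rfl,
          show Int.land (Int.negSucc m) (Int.ofNat n) = Int.ofNat (n.ldiff m) from rfl]
      exact congrArg Int.ofNat (pvSubAnd n m)
    | negSucc n =>
      have e2 : (-(Int.negSucc n) - 1).toNat = n := by rw [Int.negSucc_eq]; omega
      simp only [PySem.Int.band]
      rw [if_neg (fun h => (Int.negSucc_not_nonneg m).mp h),
          if_neg (fun h => (Int.negSucc_not_nonneg n).mp h), e, e2,
          show (Int.negSucc m).land (Int.negSucc n) = Int.negSucc (m ||| n) from rfl,
          Int.negSucc_eq]
      omega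

lemma pvBxorAssoc (a b c : Int) :
    PySem.Int.bxor (PySem.Int.bxor a b) c = PySem.Int.bxor a (PySem.Int.bxor b c) := by
  simp only [pvBxorEq]
  apply pvIntExt; intro i
  simp only [Int.testBit_lxor]
  cases a.testBit i <;> cases b.testBit i <;> cases c.testBit i <;> rfl

lemma pvZeroBxor (a : Int) : PySem.Int.bxor 0 a = a := by
  rw [PySem.Int.bxor_comm]; exact PySem.Int.bxor_zero a

lemma pvZeroBand (a : Int) : PySem.Int.band 0 a = 0 := by
  rw [PySem.Int.band_comm]; exact PySem.Int.band_zero a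

lemma pvBxorLeftComm (a b c : Int) :
    PySem.Int.bxor a (PySem.Int.bxor b c) = PySem.Int.bxor b (PySem.Int.bxor a c) := by
  rw [← pvBxorAssoc, PySem.Int.bxor_comm a b, pvBxorAssoc]

-- AND distributes over XOR (bitwise, also on negatives)
lemma pvDistrib (a b s : Int) :
    PySem.Int.bxor (PySem.Int.band a s) (PySem.Int.band b s)
      = PySem.Int.band (PySem.Int.bxor a b) s := by
  simp only [pvBxorEq, pvBandEq]
  apply pvIntExt; intro i
  simp only [Int.testBit_lxor, Int.testBit_land]
  cases a.testBit i <;> cases b.testBit i <;> cases s.testBit i <;> rfl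

lemma pvFoldlBxorInit {α : Type} (l : List α) (g : α → Int) (c : Int) :
    l.foldl (fun acc x => PySem.Int.bxor acc (g x)) c
      = PySem.Int.bxor c (l.foldl (fun acc x => PySem.Int.bxor acc (g x)) 0) := by
  induction l generalizing c with
  | nil => simp [PySem.Int.bxor_zero]
  | cons x l ih =>
    simp only [List.foldl_cons]
    rw [ih (PySem.Int.bxor c (g x)), ih (PySem.Int.bxor 0 (g x)), pvZeroBxor, pvBxorAssoc]

lemma pvFoldId {α : Type} (l : List α) (c : Int) : l.foldl (fun a (_ : α) => a) c = c := by
  induction l generalizing c with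
  | nil => rfl
  | cons x l ih => exact ih c

lemma pvFoldCombine {α : Type} (l : List α) (g h : α → Int) :
    PySem.Int.bxor (l.foldl (fun acc x => PySem.Int.bxor acc (g x)) 0)
        (l.foldl (fun acc x => PySem.Int.bxor acc (h x)) 0)
      = l.foldl (fun acc x => PySem.Int.bxor acc (PySem.Int.bxor (g x) (h x))) 0 := by
  induction l with
  | nil => simp
  | cons x l ih =>
    simp only [List.foldl_cons]
    rw [pvFoldlBxorInit l g, pvFoldlBxorInit l h,
        pvFoldlBxorInit l (fun x => PySem.Int.bxor (g x) (h x)),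
        pvZeroBxor, pvZeroBxor, pvZeroBxor, ← ih]
    rw [pvBxorAssoc (g x), pvBxorLeftComm (l.foldl (fun acc x => PySem.Int.bxor acc (g x)) 0),
        ← pvBxorAssoc (g x)]

-- per-step value: XOR over rows of row-wise evaluation = single pass against the XOR-mask of rows
lemma pvStep (pol : List (List Int)) (n : Nat) (S : Nat → Int) :
    pol.foldl (fun a row => PySem.Int.bxor a
        ((List.range n).foldl (fun b k => PySem.Int.bxor b
          (PySem.Int.band (row.getD k 0) (S k))) 0)) 0
      = (List.range n).foldl (fun a k => PySem.Int.bxor a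
          (PySem.Int.band (pol.foldl (fun acc row => PySem.Int.bxor acc (row.getD k 0)) 0) (S k))) 0 := by
  induction pol with
  | nil =>
    symm
    rw [PySem.List.foldl_congr_mem (List.range n) _ (fun a (_ : Nat) => a) 0
      (by intro acc k _; simp [pvZeroBand, PySem.Int.bxor_zero])]
    exact pvFoldId _ 0
  | cons row pol ih =>
    simp only [List.foldl_cons]
    rw [pvFoldlBxorInit pol (fun row => (List.range n).foldl (fun b k => PySem.Int.bxor b
          (PySem.Int.band (row.getD k 0) (S k))) 0), pvZeroBxor, ih,
        pvFoldCombine (List.range n) (fun k => PySem.Int.band (row.getD k 0) (S k))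
          (fun k => PySem.Int.band (pol.foldl (fun acc r => PySem.Int.bxor acc (r.getD k 0)) 0) (S k))]
    apply PySem.List.foldl_congr_mem
    intro acc k _
    rw [pvDistrib, pvFoldlBxorInit pol (fun r => r.getD k 0) (PySem.Int.bxor 0 (row.getD k 0)),
        pvZeroBxor]

lemma pvInnerLen (r m : List Int) (n : Nat) :
    ((List.range n).foldl (fun m k => m.set k (PySem.Int.bxor (m.getD k 0) (r.getD k 0))) m).length
      = m.length := by
  induction n with
  | zero => rfl
  | succ n ih =>
    rw [List.range_succ, List.foldl_append, List.foldl_cons, List.foldl_nil, List.length_set]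
    exact ih

lemma pvInnerGetD (r m : List Int) : ∀ (n k : Nat),
    ((List.range n).foldl (fun m k => m.set k (PySem.Int.bxor (m.getD k 0) (r.getD k 0))) m).getD k 0
      = if k < n ∧ k < m.length then PySem.Int.bxor (m.getD k 0) (r.getD k 0) else m.getD k 0 := by
  intro n
  induction n with
  | zero => intro k; simp
  | succ n ih =>
    intro k
    rw [List.range_succ, List.foldl_append, List.foldl_cons, List.foldl_nil]
    have hl := pvInnerLen r m n
    have hnn : ((List.range n).foldl
        (fun m k => m.set k (PySem.Int.bxor (m.getD k 0) (r.getD k 0))) m).getD n 0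
        = m.getD n 0 := by rw [ih n, if_neg (by omega)]
    rw [List.getD_eq_getElem?_getD, List.getElem?_set]
    by_cases hnk : n = k
    · subst hnk
      by_cases hlen : n <
          ((List.range n).foldl (fun m k => m.set k (PySem.Int.bxor (m.getD k 0) (r.getD k 0))) m).length
      · rw [if_pos rfl, if_pos hlen, Option.getD_some, hnn, if_pos ⟨by omega, by omega⟩]
      · rw [if_pos rfl, if_neg hlen, Option.getD_none, if_neg (by omega)]
        rw [List.getD_eq_getElem?_getD, List.getElem?_eq_none (by omega), Option.getD_none]
    · rw [if_neg hnk, ← List.getD_eq_getElem?_getD, ih k]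
      by_cases hkl : k < m.length
      · by_cases hkn : k < n
        · rw [if_pos ⟨hkn, hkl⟩, if_pos ⟨by omega, hkl⟩]
        · rw [if_neg (fun h => hkn h.1), if_neg (fun h => absurd h.1 (by omega))]
      · rw [if_neg (fun h => hkl h.2), if_neg (fun h => hkl h.2)]

lemma pvMaskGetD (pol : List (List Int)) (n : Nat) : ∀ (m : List Int) (k : Nat), k < n → k < m.length →
    (pol.foldl (fun m row => (List.range n).foldl
        (fun m k => m.set k (PySem.Int.bxor (m.getD k 0) (row.getD k 0))) m) m).getD k 0
      = pol.foldl (fun acc row => PySem.Int.bxor acc (row.getD k 0)) (m.getD k 0) := by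
  induction pol with
  | nil => intro m k _ _; rfl
  | cons row pol ih =>
    intro m k hk hkl
    simp only [List.foldl_cons]
    rw [ih _ k hk (by rw [pvInnerLen]; exact hkl), pvInnerGetD, if_pos ⟨hk, hkl⟩]

lemma pvKfold (row sec : List Int) (n i : Nat) :
    (PySem.List.pyRange 0 (n : Int) 1).foldl
      (fun b k => PySem.Int.bxor b (PySem.Int.band (PySem.List.pyGetD row k 0)
        (PySem.List.pyGetD sec (k + (0 + (i : Int))) 0))) 0
    = (List.range n).foldl
        (fun b k => PySem.Int.bxor b (PySem.Int.band (row.getD k 0) (sec.getD (k + i) 0))) 0 := by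
  rw [PySem.List.pyRange_one 0 (n : Int), List.foldl_map, sub_zero, Int.toNat_natCast]
  apply PySem.List.foldl_congr_mem
  intro b k _
  congr 1
  congr 1
  · rw [zero_add, PySem.List.pyGetD_natCast]
  · rw [show ((0 : Int) + (k : Int) + (0 + (i : Int))) = ((k + i : Nat) : Int) by push_cast; ring,
        PySem.List.pyGetD_natCast]

lemma pvStepEq (pol : List (List Int)) (sec : List Int) (i : Nat) :
    (PySem.List.pyRange 0 ((pol.length : Int)) 1).foldl
      (fun a j =>
        PySem.Int.bxor a ((PySem.List.pyRange 0 (((pol.headD []).length : Int)) 1).foldl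
          (fun b k => PySem.Int.bxor b (PySem.Int.band
            (PySem.List.pyGetD (PySem.List.pyGetD pol j []) k 0)
            (PySem.List.pyGetD sec (k + (0 + (i : Int))) 0))) 0)) 0
    = (List.range (pol.headD []).length).foldl
        (fun a k => PySem.Int.bxor a (PySem.Int.band
          ((pol.foldl (fun mask row =>
              (List.range (pol.headD []).length).foldl
                (fun mask k => mask.set k (PySem.Int.bxor (mask.getD k 0) (row.getD k 0))) mask)
            (List.replicate (pol.headD []).length 0)).getD k 0)
          (sec.getD (k + i) 0))) 0 := by
  refine Eq.trans (PySem.List.foldl_pyRange_zero_pyGetD' pol ([] : List Int)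
    (fun a row =>
      PySem.Int.bxor a ((PySem.List.pyRange 0 (((pol.headD []).length : Int)) 1).foldl
        (fun b k => PySem.Int.bxor b (PySem.Int.band
          (PySem.List.pyGetD row k 0)
          (PySem.List.pyGetD sec (k + (0 + (i : Int))) 0))) 0)) 0) ?_
  refine Eq.trans (PySem.List.foldl_congr_mem pol _
    (fun a row =>
      PySem.Int.bxor a ((List.range (pol.headD []).length).foldl
        (fun b k => PySem.Int.bxor b (PySem.Int.band (row.getD k 0) (sec.getD (k + i) 0))) 0)) 0
    ?_) ?_
  · intro acc row _
    rw [pvKfold row sec (pol.headD []).length i]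
  · refine Eq.trans (pvStep pol (pol.headD []).length (fun k => sec.getD (k + i) 0)) ?_
    apply PySem.List.foldl_congr_mem
    intro acc k hk
    have hk' := List.mem_range.mp hk
    rw [pvMaskGetD pol (pol.headD []).length (List.replicate (pol.headD []).length 0) k hk'
        (by simpa using hk'), List.getD_replicate 0 hk']

-- ===== VERDICT (by name: the statement is the Claim_ definition above) =====
theorem nlfsr_spec : Claim_equal_nlfsr := by
  intro pol semilla lon_salida _dom _pre
  unfold Spec_nlfsr
  show nlfsr pol semilla lon_salida = nlfsr_alt pol semilla lon_salida
  simp only [nlfsr, nlfsr_alt]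
  by_cases hD : lon_salida - (semilla.length : Int) ≤ 0
  · rw [if_pos hD, PySem.List.pyRange_one_eq_nil hD, List.foldl_nil]
  · rw [if_neg hD, PySem.List.pyRange_one 0 (lon_salida - (semilla.length : Int)),
        List.foldl_map, sub_zero]
    apply PySem.List.foldl_congr_mem
    intro sec i _
    exact congrArg (fun z => sec ++ [z]) (pvStepEq pol sec i)
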